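-- pv_equiv track=rewrite | github.com/FelipeM89/RepasoParcial | punto4/afd.py | afd
-- ===== SOURCE A (Python) =====
-- def afd(cadena: str) -> bool:
--     estado = 0
--     for c in cadena:
--         if estado == 0:
--             if c == 'a':
--                 estado = 0
--             elif c == 'b':
--                 estado = 1
--             else:
--                 return False
--         elif estado == 1:
--             return False
--     return estado == 1
-- ===== SOURCE B (Python) =====
-- def afd(cadena: str) -> bool:
--     # closed-form: language is a*b — nonempty, last char 'b', all previous 'a'
--     if not cadena:
--         return False
--     return cadena[-1] == 'b' and all(c == 'a' for c in cadena[:-1])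
-- ===== Notes on version B (the rewrite author's own statement) =====
-- stated objective: simpler
-- what changed: Replaces the stateful DFA loop with a closed-form test of the language a*b: last character is 'b' and every preceding character is 'a'.
import Mathlib
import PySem

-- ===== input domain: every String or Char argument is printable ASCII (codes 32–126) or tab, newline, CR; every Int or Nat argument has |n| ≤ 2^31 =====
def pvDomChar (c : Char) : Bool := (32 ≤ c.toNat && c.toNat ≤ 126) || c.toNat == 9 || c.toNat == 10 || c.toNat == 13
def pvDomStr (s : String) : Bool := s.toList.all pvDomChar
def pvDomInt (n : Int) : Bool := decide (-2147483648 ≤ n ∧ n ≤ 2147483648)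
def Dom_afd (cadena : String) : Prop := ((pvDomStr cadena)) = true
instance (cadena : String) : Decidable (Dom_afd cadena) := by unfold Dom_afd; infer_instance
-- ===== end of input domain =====

-- B replaces A's stateful DFA loop with a closed-form a*b test (last char 'b', prefix all 'a'); objective: simpler.


-- ===== PORT A =====
-- the for-loop with early return: estado carried through the chars, none/short-circuit via returning early
def afdLoop (cs : List Char) (estado : Int) : Bool :=
  match cs with
  | [] => estado == 1
  | c :: rest =>
    if estado == 0 then
      if c == 'a' then afdLoop rest 0
      else if c == 'b' then afdLoop rest 1
      else false
    else if estado == 1 then false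
    else afdLoop rest estado

def afd (cadena : String) : Bool := afdLoop cadena.toList 0

-- ===== PORT B =====
-- cadena[-1] as getLast?, cadena[:-1] as dropLast (exact for Python slicing on strings)
def afd_alt (cadena : String) : Bool :=
  match cadena.toList.getLast? with
  | none => false            -- empty string
  | some u => u == 'b' && cadena.toList.dropLast.all (· == 'a')

-- ===== PRECONDITION & SPEC =====
def Spec_afd (cadena : String) (out : Bool) : Prop := out = afd_alt cadena
instance (cadena : String) (out : Bool) : Decidable (Spec_afd cadena out) := by unfold Spec_afd; infer_instance

-- ===== CLAIM (what is proved, stated in full; the proofs are below) =====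
def Claim_equal_afd : Prop := ∀ (cadena : String), Dom_afd cadena → Spec_afd cadena (afd cadena)

-- ===== LEMMAS AND PROOFS =====
theorem afdLoop_one (cs : List Char) : afdLoop cs 1 = decide (cs = []) := by
  cases cs <;> simp [afdLoop]

def bform (cs : List Char) : Bool :=
  match cs.getLast? with
  | none => false
  | some u => u == 'b' && cs.dropLast.all (· == 'a')

theorem afdLoop_zero (cs : List Char) : afdLoop cs 0 = bform cs := by
  induction cs with
  | nil => simp [afdLoop, bform]
  | cons c rest ih =>
    cases rest with
    | nil =>
      by_cases hb : c = 'b' <;> simp [afdLoop, bform, hb, afdLoop_one]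
    | cons d t =>
      by_cases ha : c = 'a'
      · simp [afdLoop, bform, ha, afdLoop_one] at ih ⊢
        rw [ih]
      · by_cases hb : c = 'b'
        · simp only [afdLoop, bform, ha, hb]
          simp [afdLoop_one]
          cases (d :: t).getLast? <;> rfl
        · simp only [afdLoop, bform, ha, hb]
          simp
          cases (d :: t).getLast? <;> simp [ha]

-- ===== VERDICT (by name: the statement is the Claim_ definition above) =====
theorem afd_spec : Claim_equal_afd := by
  intro cadena _
  unfold Spec_afd afd afd_alt
  rw [afdLoop_zero]
  rfl
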